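-- pv_equiv track=rewrite | github.com/chelseagary/kanye-bot | bot.py | search_database_for_response
-- ===== SOURCE A (Python) =====
-- def search_database_for_response(message, responses):
--     found = list()
--     for x in responses:
--         if message.find(x[0]) >= 0:
--             found.append(x)
--     if len(found) == 0:
--         return ''
--     index_of_max_priority = 0
--     max_priority = 0
--     for i in range(len(found)):
--         if found[i][2] > max_priority:
--             index_of_max_priority = i
--             max_priority = found[i][2]
--     return found[index_of_max_priority][1]
-- ===== SOURCE B (Python) =====
-- def search_database_for_response(message, responses):
--     answer = ''
--     max_priority = 0
--     matched = False
--     for needle, reply, priority in responses: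
--         if needle in message:
--             if not matched:
--                 answer = reply
--                 matched = True
--             if priority > max_priority:
--                 answer = reply
--                 max_priority = priority
--     return answer
-- ===== Notes on version B (the rewrite author's own statement) =====
-- stated objective: simpler
-- what changed: Single streaming pass keeping a running answer/threshold/matched flag instead of building the intermediate 'found' list and then scanning it by index for the argmax.
import Mathlib
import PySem

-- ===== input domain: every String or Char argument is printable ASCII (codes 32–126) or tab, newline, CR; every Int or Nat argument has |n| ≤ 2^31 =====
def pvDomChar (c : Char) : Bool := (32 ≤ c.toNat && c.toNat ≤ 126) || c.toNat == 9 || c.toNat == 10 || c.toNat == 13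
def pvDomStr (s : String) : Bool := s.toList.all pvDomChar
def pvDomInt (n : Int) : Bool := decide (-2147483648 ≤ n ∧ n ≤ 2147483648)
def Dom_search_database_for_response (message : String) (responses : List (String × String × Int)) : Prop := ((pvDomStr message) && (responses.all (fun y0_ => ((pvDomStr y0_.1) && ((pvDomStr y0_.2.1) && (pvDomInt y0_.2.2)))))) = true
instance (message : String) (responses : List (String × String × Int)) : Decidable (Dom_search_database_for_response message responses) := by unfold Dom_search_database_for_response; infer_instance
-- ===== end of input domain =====

-- B replaces A's two phases (build the 'found' list, then an index-tracking argmax scan over it)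
-- by one streaming pass with a running answer/threshold/matched flag; objective: simpler.

-- ===== PORT A =====
def search_database_for_response (message : String) (responses : List (String × String × Int)) : String :=
  let found := responses.foldl
    (fun acc x => if PySem.Str.find message x.1 ≥ 0 then acc ++ [x] else acc) []
  if found.length = 0 then ""
  else
    let st := (PySem.List.pyRange 0 (found.length : Int) 1).foldl
      (fun (st : Int × Int) i =>
        if (PySem.List.pyGetD found i ("", "", 0)).2.2 > st.2 then
          (i, (PySem.List.pyGetD found i ("", "", 0)).2.2)
        else st) (0, 0)
    (PySem.List.pyGetD found st.1 ("", "", 0)).2.1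

-- ===== PORT B =====
def search_database_for_response_alt (message : String) (responses : List (String × String × Int)) : String :=
  (responses.foldl
    (fun (st : String × Int × Bool) x =>
      if PySem.Str.isIn x.1 message then
        let st1 := if st.2.2 = false then (x.2.1, st.2.1, true) else st
        if x.2.2 > st1.2.1 then (x.2.1, x.2.2, true) else st1
      else st) ("", 0, false)).1

-- ===== PRECONDITION & SPEC =====
def Spec_search_database_for_response (message : String) (responses : List (String × String × Int)) (out : String) : Prop := out = search_database_for_response_alt message responses
instance (message : String) (responses : List (String × String × Int)) (out : String) : Decidable (Spec_search_database_for_response message responses out) := by unfold Spec_search_database_for_response; infer_instance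

-- ===== CLAIM (what is proved, stated in full; the proofs are below) =====
def Claim_equal_search_database_for_response : Prop := ∀ (message : String) (responses : List (String × String × Int)), Dom_search_database_for_response message responses → Spec_search_database_for_response message responses (search_database_for_response message responses)

-- ===== LEMMAS AND PROOFS =====

/-- The common max-update step on (answer, max_priority). -/
def pvUpd (st : String × Int) (x : String × String × Int) : String × Int :=
  if x.2.2 > st.2 then (x.2.1, x.2.2) else st

/-- The two ports' substring tests agree. -/
lemma pvCond (message sub : String) :
    (decide (PySem.Str.find message sub ≥ 0)) = PySem.Str.isIn sub message := by
  by_cases h : sub.toList <:+: message.toList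
  · simp [ge_iff_le, PySem.Chars.find_nonneg_iff, PySem.Chars.isIn_iff_infix, h]
  · simp [ge_iff_le, PySem.Chars.find_nonneg_iff, PySem.Chars.isIn_eq_false_iff, h]

/-- Indexing the head. -/
lemma pvGetD_zero (found : List (String × String × Int)) :
    PySem.List.pyGetD found 0 ("", "", 0) = found.headD ("", "", 0) := by
  cases found <;> simp [PySem.List.pyGetD, PySem.List.pyGet?, PySem.List.pyIdx?]

/-- A's index-tracking fold, read through `st ↦ (found[st.1].reply, st.2)`, is the value fold. -/
lemma pvA_hom (found : List (String × String × Int)) (js : List Int) (st : Int × Int) :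
    ((PySem.List.pyGetD found
       (js.foldl
        (fun (st : Int × Int) i =>
          if (PySem.List.pyGetD found i ("", "", 0)).2.2 > st.2 then
            (i, (PySem.List.pyGetD found i ("", "", 0)).2.2)
          else st) st).1 ("", "", 0)).2.1,
     (js.foldl
      (fun (st : Int × Int) i =>
        if (PySem.List.pyGetD found i ("", "", 0)).2.2 > st.2 then
          (i, (PySem.List.pyGetD found i ("", "", 0)).2.2)
        else st) st).2)
    = js.foldl (fun s j => pvUpd s (PySem.List.pyGetD found j ("", "", 0)))
        ((PySem.List.pyGetD found st.1 ("", "", 0)).2.1, st.2) := by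
  induction js generalizing st with
  | nil => rfl
  | cons j t ih =>
      simp only [List.foldl_cons]
      rw [ih]
      congr 1
      simp only [pvUpd]; split_ifs <;> rfl

/-- B's loop body. -/
def pvBstep (message : String) (st : String × Int × Bool) (x : String × String × Int) : String × Int × Bool :=
  if PySem.Str.isIn x.1 message then
    if x.2.2 > (if st.2.2 = false then (x.2.1, st.2.1, true) else st).2.1 then
      (x.2.1, x.2.2, true)
    else if st.2.2 = false then (x.2.1, st.2.1, true) else st
  else st

lemma pvBstep_skip (message : String) (st : String × Int × Bool) (x : String × String × Int)
    (hx : PySem.Str.isIn x.1 message = false) : pvBstep message st x = st := by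
  simp only [pvBstep]
  rw [if_neg (by rw [hx]; simp)]

lemma pvBstep_matched (message : String) (a : String) (m : Int) (x : String × String × Int)
    (hx : PySem.Str.isIn x.1 message = true) :
    pvBstep message (a, m, true) x = ((pvUpd (a, m) x).1, (pvUpd (a, m) x).2, true) := by
  simp only [pvBstep, pvUpd, hx, if_true]
  split_ifs <;> simp_all

lemma pvBstep_first (message : String) (x : String × String × Int)
    (hx : PySem.Str.isIn x.1 message = true) :
    pvBstep message ("", 0, false) x = ((pvUpd (x.2.1, 0) x).1, (pvUpd (x.2.1, 0) x).2, true) := by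
  simp only [pvBstep, pvUpd, hx, if_true]
  split_ifs <;> simp_all

/-- Once matched, B's step is `pvUpd` on the first two components (skipping non-matches). -/
lemma pvB_matched (message : String) (t : List (String × String × Int)) (a : String) (m : Int) :
    t.foldl (pvBstep message) (a, m, true)
    = (((t.filter (fun x => PySem.Str.isIn x.1 message)).foldl pvUpd (a, m)).1,
       ((t.filter (fun x => PySem.Str.isIn x.1 message)).foldl pvUpd (a, m)).2, true) := by
  induction t generalizing a m with
  | nil => rfl
  | cons x t ih =>
      cases hx : PySem.Str.isIn x.1 message with
      | false =>
          rw [List.foldl_cons, pvBstep_skip message _ _ hx, ih,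
            List.filter_cons_of_neg (p := fun y : String × String × Int => PySem.Str.isIn y.1 message) (by simpa using hx)]
      | true =>
          rw [List.foldl_cons, pvBstep_matched message a m x hx, ih,
            List.filter_cons_of_pos (p := fun y : String × String × Int => PySem.Str.isIn y.1 message) hx, List.foldl_cons]

/-- B's full run, characterised by the filtered list. -/
lemma pvB_run (message : String) (l : List (String × String × Int)) :
    (l.foldl (pvBstep message) ("", 0, false)).1
    = (match l.filter (fun x => PySem.Str.isIn x.1 message) with
       | [] => ""
       | h :: t => (t.foldl pvUpd (pvUpd (h.2.1, 0) h)).1) := by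
  induction l with
  | nil => rfl
  | cons x t ih =>
      cases hx : PySem.Str.isIn x.1 message with
      | false =>
          rw [List.foldl_cons, pvBstep_skip message _ _ hx, ih,
            List.filter_cons_of_neg (p := fun y : String × String × Int => PySem.Str.isIn y.1 message) (by simpa using hx)]
      | true =>
          rw [List.foldl_cons, pvBstep_first message x hx,
            List.filter_cons_of_pos (p := fun y : String × String × Int => PySem.Str.isIn y.1 message) hx, pvB_matched]

/-- A's full second phase, characterised by the found list. -/
lemma pvA_run (l : List (String × String × Int)) :
    (if l.length = 0 then "" else
      (PySem.List.pyGetD l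
        ((PySem.List.pyRange 0 (l.length : Int) 1).foldl
          (fun (st : Int × Int) i =>
            if (PySem.List.pyGetD l i ("", "", 0)).2.2 > st.2 then
              (i, (PySem.List.pyGetD l i ("", "", 0)).2.2)
            else st) (0, 0)).1 ("", "", 0)).2.1)
    = (match l with
       | [] => ""
       | h :: t => (t.foldl pvUpd (pvUpd (h.2.1, 0) h)).1) := by
  cases l with
  | nil => rfl
  | cons h t =>
      rw [if_neg (by simp)]
      calc (PySem.List.pyGetD (h :: t)
              ((PySem.List.pyRange 0 (((h :: t).length : Nat) : Int) 1).foldl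
                (fun (st : Int × Int) i =>
                  if (PySem.List.pyGetD (h :: t) i ("", "", 0)).2.2 > st.2 then
                    (i, (PySem.List.pyGetD (h :: t) i ("", "", 0)).2.2)
                  else st) (0, 0)).1 ("", "", 0)).2.1
          = ((PySem.List.pyGetD (h :: t)
              ((PySem.List.pyRange 0 (((h :: t).length : Nat) : Int) 1).foldl
                (fun (st : Int × Int) i =>
                  if (PySem.List.pyGetD (h :: t) i ("", "", 0)).2.2 > st.2 then
                    (i, (PySem.List.pyGetD (h :: t) i ("", "", 0)).2.2)
                  else st) (0, 0)).1 ("", "", 0)).2.1,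
             ((PySem.List.pyRange 0 (((h :: t).length : Nat) : Int) 1).foldl
                (fun (st : Int × Int) i =>
                  if (PySem.List.pyGetD (h :: t) i ("", "", 0)).2.2 > st.2 then
                    (i, (PySem.List.pyGetD (h :: t) i ("", "", 0)).2.2)
                  else st) (0, 0)).2).1 := rfl
        _ = ((PySem.List.pyRange 0 (((h :: t).length : Nat) : Int) 1).foldl
              (fun s j => pvUpd s (PySem.List.pyGetD (h :: t) j ("", "", 0)))
              ((PySem.List.pyGetD (h :: t) 0 ("", "", 0)).2.1, 0)).1 := by rw [pvA_hom]
        _ = ((h :: t).foldl pvUpd ((PySem.List.pyGetD (h :: t) 0 ("", "", 0)).2.1, 0)).1 := by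
              rw [PySem.List.foldl_pyRange_zero_pyGetD' (h :: t) ("", "", 0) pvUpd]
        _ = (t.foldl pvUpd (pvUpd (h.2.1, 0) h)).1 := by
              rw [pvGetD_zero, List.foldl_cons]; rfl

theorem search_database_for_response_spec : Claim_equal_search_database_for_response := by
  intro message responses _
  unfold Spec_search_database_for_response search_database_for_response search_database_for_response_alt
  simp only [PySem.List.foldl_append_ite_eq_filter, List.nil_append,
    List.filter_congr (fun x (_ : x ∈ responses) => pvCond message x.1), pvA_run]
  rw [show (fun (st : String × Int × Bool) x =>
        if PySem.Str.isIn x.1 message = true then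
          if x.2.2 > (if st.2.2 = false then (x.2.1, st.2.1, true) else st).2.1 then
            (x.2.1, x.2.2, true)
          else if st.2.2 = false then (x.2.1, st.2.1, true) else st
        else st) = pvBstep message from rfl, pvB_run]
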